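-- pv_equiv track=rewrite | github.com/Xza85hrf/AudioSmith | audiosmith/prosody.py | _estimate_word_boundaries
-- ===== SOURCE A (Python) =====
-- from typing import List, Tuple
--
-- def _estimate_word_boundaries(
--     text: str, total_samples: int,
-- ) -> List[Tuple[int, int, str]]:
--     """Estimate sample-level word boundaries from text proportionally.
--
--     Returns list of (start_sample, end_sample, word).
--     """
--     words = text.split()
--     if not words:
--         return []
--
--     total_chars = sum(len(w) for w in words) + max(0, len(words) - 1)
--     if total_chars == 0:
--         return []
--
--     boundaries: List[Tuple[int, int, str]] = []
--     char_pos = 0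
--     for word in words:
--         word_len = len(word) + 1  # +1 for space
--         start = int((char_pos / total_chars) * total_samples)
--         end = int(((char_pos + word_len) / total_chars) * total_samples)
--         end = min(end, total_samples)
--         boundaries.append((start, end, word))
--         char_pos += word_len
--
--     return boundaries
-- ===== SOURCE B (Python) =====
-- def _estimate_word_boundaries(text, total_samples):
--     """Index-based formulation: each cut point is computed independently from its
--     index via a prefix-sum formula; no running state is threaded through a loop."""
--     words = text.split()
--     if not words:
--         return []
--     total_chars = sum(len(w) for w in words) + max(0, len(words) - 1)
--     if total_chars == 0:
--         return []
--
--     def cut(i):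
--         offset = sum(len(w) for w in words[:i]) + i
--         return int((offset / total_chars) * total_samples)
--
--     return [(cut(i), min(cut(i + 1), total_samples), words[i])
--             for i in range(len(words))]
-- ===== Notes on version B (the rewrite author's own statement) =====
-- stated objective: alternative
-- what changed: A threads a running char_pos accumulator through a single loop, emitting triples as it goes; B has no running state at all: each boundary is computed independently from its index i by the closed-form prefix-sum offset sum(len(w) for w in words[:i]) + i, a stateless quadratic index-based formulation.
import Mathlib
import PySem

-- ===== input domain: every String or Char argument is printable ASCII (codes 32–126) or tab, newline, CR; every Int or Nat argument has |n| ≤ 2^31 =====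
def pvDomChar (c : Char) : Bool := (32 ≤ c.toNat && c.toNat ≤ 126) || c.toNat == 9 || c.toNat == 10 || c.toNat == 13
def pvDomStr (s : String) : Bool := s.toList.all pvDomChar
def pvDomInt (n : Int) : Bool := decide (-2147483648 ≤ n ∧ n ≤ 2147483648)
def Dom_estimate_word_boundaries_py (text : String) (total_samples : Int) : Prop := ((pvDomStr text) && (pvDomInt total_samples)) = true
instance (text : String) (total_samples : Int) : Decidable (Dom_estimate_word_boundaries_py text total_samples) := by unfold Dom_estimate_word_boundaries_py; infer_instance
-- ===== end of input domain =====

-- B replaces A's stateful accumulator loop by a stateless index-based formulation: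
-- each boundary is computed independently from its index by a prefix-sum formula
-- (objective: alternative; B is quadratic, A linear).

-- ===== PORT A =====
-- Shared hand-port of Python's float expression int((a/b) * s) for 0 ≤ a, 0 < b,
-- |s| ≤ 2^31 (no PySem primitive covers two-step float arithmetic). It is exact IEEE-754
-- double semantics on that domain: ewbRnd rounds the rational a/b to a 53-bit significand
-- with round-half-to-even (no overflow/subnormals arise on this domain), the product with
-- the exactly-representable s is rounded the same way, and the result truncated toward zero.
def ewbRnd (a b : Nat) : Nat × Int :=
  if a = 0 then (0, 0) else
  let k0 : Int := 53 - ((PySem.Int.bitLength (a : Int) : Int) - (PySem.Int.bitLength (b : Int) : Int))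
  let k : Int :=
    if a * 2 ^ (max k0 0).toNat / (b * 2 ^ (max (-k0) 0).toNat) ≥ 2 ^ 53 then k0 - 1 else k0
  let A := a * 2 ^ (max k 0).toNat
  let B := b * 2 ^ (max (-k) 0).toNat
  let m0 := A / B
  let r := A - m0 * B
  let m := if B < 2 * r ∨ (2 * r = B ∧ m0 % 2 = 1) then m0 + 1 else m0
  if m = 2 ^ 53 then (2 ^ 52, -k + 1) else (m, -k)

def ewbCut (o t s : Int) : Int :=
  let p1 := ewbRnd o.toNat t.toNat
  let p2 := ewbRnd (p1.1 * s.natAbs) 1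
  let E := p1.2 + p2.2
  let M : Nat := if 0 ≤ E then p2.1 * 2 ^ E.toNat else p2.1 / 2 ^ (-E).toNat
  if s < 0 then -(M : Int) else (M : Int)

-- the body of A's for-loop: thread char_pos, append the clamped triple
def ewbStep (c s : Int) (st : Int × List (Int × Int × String)) (w : String) :
    Int × List (Int × Int × String) :=
  let word_len := PySem.Str.len w + 1
  let start := ewbCut st.1 c s
  let e := min (ewbCut (st.1 + word_len) c s) s
  (st.1 + word_len, st.2 ++ [(start, e, w)])

def estimate_word_boundaries_py (text : String) (total_samples : Int) : List (Int × Int × String) :=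
  let words := PySem.Str.split₀ text
  if words = [] then [] else
  let total_chars : Int := (words.map (fun w => PySem.Str.len w)).sum + max 0 ((words.length : Int) - 1)
  if total_chars = 0 then [] else
  (words.foldl (ewbStep total_chars total_samples) ((0 : Int), [])).2

-- ===== PORT B =====
-- B's local helper cut(i): offset = sum(len(w) for w in words[:i]) + i, then int((offset/c)*s)
def ewbCutB (ws : List String) (c s : Int) (i : Nat) : Int :=
  let offset : Int :=
    ((PySem.List.slice ws none (some (i : Int))).map (fun w => PySem.Str.len w)).sum + (i : Int)
  ewbCut offset c s

def estimate_word_boundaries_py_alt (text : String) (total_samples : Int) : List (Int × Int × String) :=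
  let words := PySem.Str.split₀ text
  if words = [] then [] else
  let total_chars : Int := (words.map (fun w => PySem.Str.len w)).sum + max 0 ((words.length : Int) - 1)
  if total_chars = 0 then [] else
  -- list comprehension over range(len(words)); words[i] is exact as getD since i < length
  (List.range words.length).map (fun i =>
    (ewbCutB words total_chars total_samples i,
     min (ewbCutB words total_chars total_samples (i + 1)) total_samples,
     words.getD i ""))

-- ===== PRECONDITION & SPEC =====
def Spec_estimate_word_boundaries_py (text : String) (total_samples : Int) (out : List (Int × Int × String)) : Prop := out = estimate_word_boundaries_py_alt text total_samples
instance (text : String) (total_samples : Int) (out : List (Int × Int × String)) : Decidable (Spec_estimate_word_boundaries_py text total_samples out) := by unfold Spec_estimate_word_boundaries_py; infer_instance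

-- ===== CLAIM (what is proved, stated in full; the proofs are below) =====
def Claim_equal_estimate_word_boundaries_py : Prop := ∀ (text : String) (total_samples : Int), Dom_estimate_word_boundaries_py text total_samples → Spec_estimate_word_boundaries_py text total_samples (estimate_word_boundaries_py text total_samples)

-- ===== LEMMAS AND PROOFS =====

-- The spine of A's result: the triples emitted from character position cp on.
def ewbSpine (c s : Int) : Int → List String → List (Int × Int × String)
  | _, [] => []
  | cp, w :: ws =>
      (ewbCut cp c s, min (ewbCut (cp + (PySem.Str.len w + 1)) c s) s, w)
        :: ewbSpine c s (cp + (PySem.Str.len w + 1)) ws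

theorem ewb_foldA (c s : Int) (ws : List String) (cp : Int) (acc : List (Int × Int × String)) :
    (ws.foldl (ewbStep c s) (cp, acc)).2 = acc ++ ewbSpine c s cp ws := by
  induction ws generalizing cp acc with
  | nil => simp [ewbSpine]
  | cons w rest ih => simp [ewbStep, ewbSpine, ih]

-- cumulative offset in spine form: sum of (len+1) over the first i words
def ewbOffN (ws : List String) (i : Nat) : Int :=
  ((ws.take i).map (fun w => PySem.Str.len w + 1)).sum

theorem ewbOffN_zero (ws : List String) : ewbOffN ws 0 = 0 := by simp [ewbOffN]

theorem ewbOffN_cons (w : String) (ws : List String) (i : Nat) :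
    ewbOffN (w :: ws) (i + 1) = (PySem.Str.len w + 1) + ewbOffN ws i := by
  simp [ewbOffN, List.take_succ_cons]

-- the spine as an index-based map
theorem ewb_spine_map (c s : Int) (ws : List String) (cp : Int) :
    ewbSpine c s cp ws = (List.range ws.length).map (fun i =>
      (ewbCut (cp + ewbOffN ws i) c s,
       min (ewbCut (cp + ewbOffN ws (i + 1)) c s) s,
       ws.getD i "")) := by
  induction ws generalizing cp with
  | nil => simp [ewbSpine]
  | cons w rest ih =>
      rw [List.length_cons, List.range_succ_eq_map, List.map_cons, List.map_map]
      simp only [ewbSpine, ewbOffN_zero, ewbOffN_cons]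
      rw [ih (cp + (PySem.Str.len w + 1))]
      refine List.cons_eq_cons.mpr ⟨by simp, ?_⟩
      apply List.map_congr_left
      intro i _
      simp [Function.comp, ewbOffN_cons, add_assoc]

-- generic: summing (len+1) = summing len plus the count
theorem ewb_sum_add_one (l : List String) :
    (l.map (fun w => PySem.Str.len w + 1)).sum
      = (l.map (fun w => PySem.Str.len w)).sum + (l.length : Int) := by
  induction l with
  | nil => simp
  | cons w rest ih => simp; ring

-- B's per-index offset equals the cumulative spine offset (for i within range)
theorem ewbCutB_eq (ws : List String) (c s : Int) (i : Nat) (h : i ≤ ws.length) :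
    ewbCutB ws c s i = ewbCut (ewbOffN ws i) c s := by
  unfold ewbCutB ewbOffN
  rw [PySem.List.slice_to_natCast, ewb_sum_add_one, List.length_take, Nat.min_eq_left h]

-- ===== VERDICT (by name: the statement is the Claim_ definition above) =====
theorem estimate_word_boundaries_py_spec : Claim_equal_estimate_word_boundaries_py := by
  intro text total_samples _
  unfold Spec_estimate_word_boundaries_py
  unfold estimate_word_boundaries_py estimate_word_boundaries_py_alt
  by_cases hw : PySem.Str.split₀ text = []
  · simp [hw]
  · simp only [hw, if_false]
    set ws := PySem.Str.split₀ text with hws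
    set c : Int := (ws.map (fun w => PySem.Str.len w)).sum + max 0 ((ws.length : Int) - 1) with hc
    by_cases hz : c = 0
    · simp only [hz, if_true]
    · simp only [hz, if_false]
      rw [ewb_foldA, List.nil_append, ewb_spine_map]
      apply List.map_congr_left
      intro i hi
      have hi' : i < ws.length := List.mem_range.mp hi
      rw [ewbCutB_eq ws c total_samples i (Nat.le_of_lt hi'),
          ewbCutB_eq ws c total_samples (i + 1) hi']
      simp
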